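-- pv_equiv track=rewrite | github.com/Code-forlife/Data-Analytics-Experiment | 1)Experiment/5_/exp5.py | calculate_frequency
-- ===== SOURCE A (Python) =====
-- def calculate_frequency(itemset, frequent_itemsets):
--     frequency = {}
--     for item in frequent_itemsets:
--         for transaction in itemset:
--             if set(item).issubset(set(transaction)):
--                 if tuple(item) in frequency:
--                     frequency[tuple(item)] += 1
--                 else:
--                     frequency[tuple(item)] = 1
--     return frequency
-- ===== SOURCE B (Python) =====
-- def calculate_frequency(itemset, frequent_itemsets):
--     # Inverted index: element -> list of indices of transactions containing it.
--     postings = {}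
--     for i, transaction in enumerate(itemset):
--         for e in set(transaction):
--             postings.setdefault(e, []).append(i)
--     n = len(itemset)
--     frequency = {}
--     for item in frequent_itemsets:
--         elems = set(item)
--         if not elems:
--             count = n
--         else:
--             acc = None
--             for e in elems:
--                 p = postings.get(e, [])
--                 if acc is None:
--                     acc = p
--                 else:
--                     ps = set(p)
--                     acc = [i for i in acc if i in ps]
--             count = len(acc)
--         if count > 0:
--             frequency[tuple(item)] = frequency.get(tuple(item), 0) + count
--     return frequency
-- ===== Notes on version B (the rewrite author's own statement) =====
-- stated objective: faster
-- what changed: A re-tests set(item).issubset(set(transaction)) for every (item, transaction) pair; B builds an inverted index (element -> sorted list of transaction indices) once and counts each itemset by intersecting the posting lists of its elements, inserting a key only when the count is positive.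
import Mathlib
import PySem

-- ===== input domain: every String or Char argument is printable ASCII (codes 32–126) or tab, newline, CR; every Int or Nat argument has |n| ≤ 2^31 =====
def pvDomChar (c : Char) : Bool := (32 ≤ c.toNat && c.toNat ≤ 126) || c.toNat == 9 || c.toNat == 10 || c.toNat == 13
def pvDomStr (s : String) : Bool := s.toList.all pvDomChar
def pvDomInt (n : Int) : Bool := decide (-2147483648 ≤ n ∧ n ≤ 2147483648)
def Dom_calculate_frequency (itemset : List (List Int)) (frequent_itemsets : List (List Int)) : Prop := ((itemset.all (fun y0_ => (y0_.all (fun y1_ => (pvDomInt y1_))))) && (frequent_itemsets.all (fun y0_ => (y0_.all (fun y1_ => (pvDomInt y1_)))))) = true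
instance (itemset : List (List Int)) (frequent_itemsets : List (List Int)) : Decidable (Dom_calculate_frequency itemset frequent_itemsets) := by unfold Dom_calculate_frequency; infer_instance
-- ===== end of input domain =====

-- B replaces A's nested subset scan by an inverted index (element -> transaction indices)
-- intersected per itemset; objective: faster (measured), same return value.

-- ===== PORT A =====
-- set(item).issubset(set(transaction))
def pvSub (item t : List Int) : Bool :=
  PySem.Set.issubset (PySem.Set.ofList item) (PySem.Set.ofList t)

def calculate_frequency (itemset : List (List Int)) (frequent_itemsets : List (List Int)) : List (List Int × Int) :=
  (frequent_itemsets.foldl (fun frequency item =>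
      itemset.foldl (fun frequency transaction =>
        if pvSub item transaction then
          if frequency.contains item then
            frequency.insert item (frequency.getD item 0 + 1)
          else
            frequency.insert item 1
        else frequency) frequency)
    (PySem.Dict.empty : PySem.Dict (List Int) Int)).items

-- ===== PORT B =====
-- postings: for i, transaction in enumerate(itemset): for e in set(transaction): postings.setdefault(e, []).append(i)
def pvPostings (itemset : List (List Int)) : PySem.Dict Int (List Int) :=
  (PySem.List.enumerate itemset 0).foldl (fun postings p =>
      (PySem.Set.ofList p.2).foldl (fun postings e =>
        postings.modify e [] (fun l => l ++ [p.1])) postings)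
    PySem.Dict.empty

-- count for one item: len(itemset) if item is empty, else size of the intersection of its posting lists
def pvCount (postings : PySem.Dict Int (List Int)) (n : Nat) (item : List Int) : Nat :=
  let elems := PySem.Set.ofList item
  if elems.isEmpty then n
  else
    ((elems.foldl (fun acc e =>
        let p := postings.getD e []
        match acc with
        | none => some p
        | some a => some (a.filter (fun i => PySem.Set.contains (PySem.Set.ofList p) i))) none).getD []).length

def calculate_frequency_alt (itemset : List (List Int)) (frequent_itemsets : List (List Int)) : List (List Int × Int) :=
  let postings := pvPostings itemset
  let n := itemset.length
  (frequent_itemsets.foldl (fun frequency item =>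
      let count := pvCount postings n item
      if 0 < count then frequency.insert item (frequency.getD item 0 + (count : Int))
      else frequency)
    (PySem.Dict.empty : PySem.Dict (List Int) Int)).items

-- ===== PRECONDITION & SPEC =====
def Spec_calculate_frequency (itemset : List (List Int)) (frequent_itemsets : List (List Int)) (out : List (List Int × Int)) : Prop := out = calculate_frequency_alt itemset frequent_itemsets
instance (itemset : List (List Int)) (frequent_itemsets : List (List Int)) (out : List (List Int × Int)) : Decidable (Spec_calculate_frequency itemset frequent_itemsets out) := by unfold Spec_calculate_frequency; infer_instance

-- ===== CLAIM (what is proved, stated in full; the proofs are below) =====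
def Claim_equal_calculate_frequency : Prop := ∀ (itemset : List (List Int)) (frequent_itemsets : List (List Int)), Dom_calculate_frequency itemset frequent_itemsets → Spec_calculate_frequency itemset frequent_itemsets (calculate_frequency itemset frequent_itemsets)

-- ===== LEMMAS AND PROOFS =====


theorem pvFoldFlat {α β γ : Type} (l : List α) (g : α → List β) (f : γ → β → γ) (init : γ) :
    l.foldl (fun d x => (g x).foldl f d) init = (l.flatMap g).foldl f init := by
  induction l generalizing init with
  | nil => rfl
  | cons a l ih => simp [List.flatMap_cons, List.foldl_append, ih]

theorem pvOnekey (s : List Int) (i e : Int) (hs : s.Nodup) :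
    (s.map (fun x => (x, i))).filter (fun q => q.1 == e) = if e ∈ s then [(e, i)] else [] := by
  induction s with
  | nil => simp
  | cons a s ih =>
    have ha : a ∉ s := (List.nodup_cons.mp hs).1
    have ih' := ih (List.nodup_cons.mp hs).2
    simp only [List.map_cons, List.filter_cons]
    by_cases hae : a = e
    · subst hae
      simp [ih', ha]
    · simp [hae, ih', Ne.symm hae, List.mem_cons]

theorem pvFlatFilter (l : List (Int × List Int)) (e : Int) :
    ((l.flatMap (fun p => (PySem.Set.ofList p.2).map (fun x => (x, p.1)))).filter
        (fun q => q.1 == e)).map (fun q => q.2)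
    = (l.filter (fun p => decide (e ∈ p.2))).map (fun p => p.1) := by
  induction l with
  | nil => simp
  | cons p l ih =>
    simp only [List.flatMap_cons, List.filter_append, List.map_append, ih, List.filter_cons]
    rw [pvOnekey _ p.1 e (PySem.Set.nodup_ofList p.2)]
    by_cases h : e ∈ p.2
    · simp [h, PySem.Set.mem_ofList]
    · simp [h, PySem.Set.mem_ofList]

-- A's inner loop over the transactions collapses to one counted update.
theorem innerA_collapse (item : List Int) (ts : List (List Int)) (d : PySem.Dict (List Int) Int) :
    ts.foldl (fun frequency transaction =>
        if pvSub item transaction then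
          if frequency.contains item then
            frequency.insert item (frequency.getD item 0 + 1)
          else
            frequency.insert item 1
        else frequency) d
    = if 0 < ts.countP (pvSub item) then
        d.insert item (d.getD item 0 + (ts.countP (pvSub item) : Int))
      else d := by
  induction ts generalizing d with
  | nil => simp
  | cons t ts ih =>
    simp only [List.foldl_cons, List.countP_cons]
    by_cases hs : pvSub item t
    · have hstep : (if pvSub item t then
          if d.contains item then d.insert item (d.getD item 0 + 1) else d.insert item 1
          else d) = d.insert item (d.getD item 0 + 1) := by
        by_cases hc : d.contains item
        · simp [hs, hc]
        · have h0 : d.getD item 0 = 0 := PySem.Dict.getD_of_not_contains d 0 (by simpa using hc)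
          simp [hs, hc, h0]
      rw [hstep, ih]
      by_cases h0 : 0 < ts.countP (pvSub item)
      · have h1 : 0 < ts.countP (pvSub item) + 1 := by omega
        simp only [h0, if_true, hs, if_true, h1]
        rw [PySem.Dict.getD_insert_self, PySem.Dict.insert_insert_self]
        congr 1
        push_cast
        ring
      · have hc0 : ts.countP (pvSub item) = 0 := by omega
        simp [hc0, hs]
    · simp only [hs, if_false, Bool.false_eq_true]
      rw [ih]
      simp

-- the flattened form of the postings build
theorem pvPostings_flat (itemset : List (List Int)) :
    pvPostings itemset
    = ((PySem.List.enumerate itemset 0).flatMap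
        (fun p => (PySem.Set.ofList p.2).map (fun e => (e, p.1)))).foldl
        (fun d q => d.modify q.1 [] (fun l => l ++ [q.2])) PySem.Dict.empty := by
  unfold pvPostings
  have hin : ∀ (d : PySem.Dict Int (List Int)) (p : Int × List Int),
      (PySem.Set.ofList p.2).foldl (fun d e => d.modify e [] (fun l => l ++ [p.1])) d
      = ((PySem.Set.ofList p.2).map (fun e => (e, p.1))).foldl
          (fun d q => d.modify q.1 [] (fun l => l ++ [q.2])) d := by
    intro d p
    rw [List.foldl_map]
  simp only [hin]
  rw [pvFoldFlat]

theorem pvPostings_getD (itemset : List (List Int)) (e : Int) :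
    (pvPostings itemset).getD e []
    = ((PySem.List.enumerate itemset 0).filter (fun p => decide (e ∈ p.2))).map (fun p => p.1) := by
  rw [pvPostings_flat, PySem.Dict.getD_foldl_modify_append]
  rw [PySem.Dict.getD_empty, List.nil_append]
  exact pvFlatFilter (PySem.List.enumerate itemset 0) e

theorem mem_postings_iff (itemset : List (List Int)) (e : Int) (p : Int × List Int)
    (hp : p ∈ PySem.List.enumerate itemset 0) :
    p.1 ∈ (pvPostings itemset).getD e [] ↔ e ∈ p.2 := by
  rw [pvPostings_getD]
  have hnd : ((PySem.List.enumerate itemset 0).map (fun p => p.1)).Nodup := by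
    rw [PySem.List.map_fst_enumerate]
    exact PySem.List.nodup_pyRange_one 0 (0 + itemset.length) 
  constructor
  · intro h
    rcases List.mem_map.mp h with ⟨q, hq, hfst⟩
    rcases List.mem_filter.mp hq with ⟨hqmem, hqe⟩
    have : q = p := List.inj_on_of_nodup_map hnd hqmem hp hfst
    subst this
    simpa using hqe
  · intro h
    exact List.mem_map.mpr ⟨p, List.mem_filter.mpr ⟨hp, by simpa using h⟩, rfl⟩

theorem acc_fold_some (itemset : List (List Int)) (es : List Int) (Q : Int × List Int → Bool) :
    es.foldl (fun acc e =>
        let p := (pvPostings itemset).getD e []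
        match acc with
        | none => some p
        | some a => some (a.filter (fun i => PySem.Set.contains (PySem.Set.ofList p) i)))
      (some (((PySem.List.enumerate itemset 0).filter Q).map (fun p => p.1)))
    = some (((PySem.List.enumerate itemset 0).filter
        (fun p => Q p && es.all (fun e => decide (e ∈ p.2)))).map (fun p => p.1)) := by
  induction es generalizing Q with
  | nil => simp
  | cons e es ih =>
    simp only [List.foldl_cons]
    have hstep :
        (((PySem.List.enumerate itemset 0).filter Q).map (fun p => p.1)).filter
            (fun i => PySem.Set.contains (PySem.Set.ofList ((pvPostings itemset).getD e [])) i)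
        = ((PySem.List.enumerate itemset 0).filter (fun p => Q p && decide (e ∈ p.2))).map (fun p => p.1) := by
      have hcont : (fun i => PySem.Set.contains (PySem.Set.ofList ((pvPostings itemset).getD e [])) i)
          = (fun i => decide (i ∈ (pvPostings itemset).getD e [])) := by
        funext i
        simp [PySem.Set.contains_eq_listContains, List.contains_eq_mem, PySem.Set.mem_ofList]
      rw [hcont, List.filter_map, List.filter_filter]
      congr 1
      apply List.filter_congr
      intro q hq
      have hmem : q.1 ∈ (pvPostings itemset).getD e [] ↔ e ∈ q.2 := mem_postings_iff itemset e q hq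
      simp [Function.comp, Bool.and_comm, hmem]
    rw [hstep, ih]
    have hpred : (fun p : Int × List Int => Q p && decide (e ∈ p.2) && es.all fun e => decide (e ∈ p.2))
        = (fun p : Int × List Int => Q p && (e :: es).all fun e => decide (e ∈ p.2)) := by
      funext p
      simp [List.all_cons, Bool.and_assoc]
    rw [hpred]

theorem pvCount_eq_countP (itemset : List (List Int)) (item : List Int) :
    pvCount (pvPostings itemset) itemset.length item = itemset.countP (pvSub item) := by
  have hpt : ∀ t : List Int, ((PySem.Set.ofList item).all (fun e => decide (e ∈ t))) = pvSub item t := by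
    intro t
    rw [Bool.eq_iff_iff]
    unfold pvSub
    simp [List.all_eq_true, PySem.Set.issubset_iff, PySem.Set.mem_ofList]
  unfold pvCount
  by_cases hnil : item = []
  · subst hnil
    simp only [PySem.Set.ofList_nil, List.isEmpty_nil, if_true]
    have hconst : pvSub [] = (fun _ : List Int => true) := by
      funext t
      rw [← hpt t]
      simp [PySem.Set.ofList_nil]
    rw [hconst, List.countP_true]
  · have hne : PySem.Set.ofList item ≠ [] := by
      cases item with
      | nil => exact absurd rfl hnil
      | cons x xs =>
        rw [PySem.Set.ofList_cons]
        simp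
    obtain ⟨e0, es, helems⟩ := List.exists_cons_of_ne_nil hne
    rw [helems]
    simp only [List.isEmpty_cons, List.foldl_cons]
    rw [pvPostings_getD, acc_fold_some]
    rw [Option.getD_some, List.length_map, ← List.countP_eq_length_filter]
    conv_rhs => rw [← PySem.List.map_snd_enumerate itemset 0]
    rw [List.countP_map]
    apply List.countP_congr
    intro q _
    simp only [Function.comp]
    rw [← hpt q.2, helems, List.all_cons]

theorem calculate_frequency_spec' (itemset frequent_itemsets : List (List Int)) :
    calculate_frequency itemset frequent_itemsets = calculate_frequency_alt itemset frequent_itemsets := by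
  unfold calculate_frequency calculate_frequency_alt
  simp only []
  congr 1
  congr 1
  funext d item
  rw [innerA_collapse, pvCount_eq_countP]

-- ===== VERDICT (by name: the statement is the Claim_ definition above) =====
theorem calculate_frequency_spec : Claim_equal_calculate_frequency := by
  intro itemset frequent_itemsets _
  exact calculate_frequency_spec' itemset frequent_itemsets
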